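-- pv_equiv track=rewrite | github.com/dmcclean780/advent-of-code-2025 | day6/part2.py | split_at_indices
-- ===== SOURCE A (Python) =====
-- def split_at_indices(line, indices):
--     parts = []
--     last_index = 0
--     for i in indices:
--         parts.append(line[last_index:i])
--         last_index = i + 1
--     parts.append(line[last_index:])
--     return parts
-- ===== SOURCE B (Python) =====
-- def split_at_indices(line, indices):
--     # Build the parts back-to-front: walk the indices in reverse, carrying the
--     # end boundary of the piece to the right, then reverse once at the end.
--     parts = []
--     end = None
--     for i in reversed(indices):
--         parts.append(line[i + 1:] if end is None else line[i + 1:end])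
--         end = i
--     parts.append(line[:] if end is None else line[:end])
--     parts.reverse()
--     return parts
-- ===== Notes on version B (the rewrite author's own statement) =====
-- stated objective: alternative
-- what changed: Builds the result back-to-front: B walks the indices in reverse carrying the end boundary of the piece to its right (None = open end) and reverses once, instead of A's forward loop with a running last_index start accumulator and a separate trailing append.
import Mathlib
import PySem

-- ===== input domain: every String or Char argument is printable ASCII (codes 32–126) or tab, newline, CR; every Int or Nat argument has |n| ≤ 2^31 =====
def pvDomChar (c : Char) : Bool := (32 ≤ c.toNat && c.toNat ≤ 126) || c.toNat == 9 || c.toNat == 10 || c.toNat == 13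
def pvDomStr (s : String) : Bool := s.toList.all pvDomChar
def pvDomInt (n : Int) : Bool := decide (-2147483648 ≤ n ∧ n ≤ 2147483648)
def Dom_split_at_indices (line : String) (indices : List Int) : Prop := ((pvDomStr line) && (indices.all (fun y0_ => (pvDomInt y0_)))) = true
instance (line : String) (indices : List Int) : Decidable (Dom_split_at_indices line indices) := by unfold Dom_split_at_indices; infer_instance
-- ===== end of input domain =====

-- B builds the parts back-to-front: it walks the indices in REVERSE carrying the end
-- boundary of the piece to its right (Option, none = open end) and reverses once at the
-- end, instead of A's forward loop with a running start accumulator plus trailing append.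

-- ===== PORT A =====
-- parts = []; last_index = 0; for i in indices: parts.append(line[last_index:i]); last_index = i+1
-- parts.append(line[last_index:]); return parts
def split_at_indices (line : String) (indices : List Int) : List String :=
  let st := indices.foldl
    (fun (s : List String × Int) i =>
      (s.1 ++ [PySem.Str.slice line (some s.2) (some i)], i + 1)) ([], 0)
  st.1 ++ [PySem.Str.slice line (some st.2) none]

-- ===== PORT B =====
-- parts = []; end = None
-- for i in reversed(indices): parts.append(line[i+1:] if end is None else line[i+1:end]); end = i
-- parts.append(line[:] if end is None else line[:end]); parts.reverse(); return parts
def split_at_indices_alt (line : String) (indices : List Int) : List String :=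
  let st := indices.reverse.foldl
    (fun (s : List String × Option Int) i =>
      (s.1 ++ [match s.2 with
               | none => PySem.Str.slice line (some (i + 1)) none
               | some e => PySem.Str.slice line (some (i + 1)) (some e)], some i)) ([], none)
  let parts := st.1 ++ [match st.2 with
    | none => PySem.Str.slice line none none
    | some e => PySem.Str.slice line none (some e)]
  parts.reverse

-- ===== PRECONDITION & SPEC =====
def Spec_split_at_indices (line : String) (indices : List Int) (out : List String) : Prop := out = split_at_indices_alt line indices
instance (line : String) (indices : List Int) (out : List String) : Decidable (Spec_split_at_indices line indices out) := by unfold Spec_split_at_indices; infer_instance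

-- ===== CLAIM (what is proved, stated in full; the proofs are below) =====
def Claim_equal_split_at_indices : Prop := ∀ (line : String) (indices : List Int), Dom_split_at_indices line indices → Spec_split_at_indices line indices (split_at_indices line indices)

-- ===== LEMMAS AND PROOFS =====

-- A's pieces, written as a structural recursion: piece from a to the next index, then on.
def pvPieces (line : String) : Int → List Int → List String
  | a, [] => [PySem.Str.slice line (some a) none]
  | a, i :: l => PySem.Str.slice line (some a) (some i) :: pvPieces line (i + 1) l

-- B's pieces after the head piece: each starts one past its index, ends at the next index.
def pvTail (line : String) : List Int → List String
  | [] => []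
  | i :: l => (match l.head? with
               | none => PySem.Str.slice line (some (i + 1)) none
               | some e => PySem.Str.slice line (some (i + 1)) (some e)) :: pvTail line l

-- A's fold equals pvPieces.
theorem pvA_eq (line : String) (l : List Int) : ∀ (acc : List String) (a : Int),
    (l.foldl (fun (s : List String × Int) i =>
        (s.1 ++ [PySem.Str.slice line (some s.2) (some i)], i + 1)) (acc, a)).1
      ++ [PySem.Str.slice line
            (some (l.foldl (fun (s : List String × Int) i =>
              (s.1 ++ [PySem.Str.slice line (some s.2) (some i)], i + 1)) (acc, a)).2) none]
    = acc ++ pvPieces line a l := by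
  induction l with
  | nil => intro acc a; simp [pvPieces]
  | cons i l ih =>
      intro acc a
      simp only [List.foldl_cons, pvPieces]
      rw [ih]
      simp

-- B's reverse fold: the collected pieces are pvTail reversed, the end marker is head?.
theorem pvB_fold (line : String) (l : List Int) :
    l.reverse.foldl
      (fun (s : List String × Option Int) i =>
        (s.1 ++ [match s.2 with
                 | none => PySem.Str.slice line (some (i + 1)) none
                 | some e => PySem.Str.slice line (some (i + 1)) (some e)], some i)) ([], none)
    = ((pvTail line l).reverse, l.head?) := by
  induction l with
  | nil => simp [pvTail]
  | cons i l ih =>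
      simp only [List.reverse_cons, List.foldl_append, ih, List.foldl_cons, List.foldl_nil]
      simp [pvTail]

-- pvPieces decomposes as head piece (ending at the first index, if any) plus pvTail.
theorem pvPieces_eq (line : String) (l : List Int) : ∀ (a : Int),
    pvPieces line a l
    = (match l.head? with
       | none => PySem.Str.slice line (some a) none
       | some e => PySem.Str.slice line (some a) (some e)) :: pvTail line l := by
  induction l with
  | nil => intro a; simp [pvPieces, pvTail]
  | cons i l ih =>
      intro a
      simp only [pvPieces, pvTail, List.head?_cons]
      rw [ih]

-- line[0:b] = line[:b] for either kind of stop.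
theorem pvSlice_zero (line : String) (b : Option Int) :
    PySem.Str.slice line (some 0) b = PySem.Str.slice line none b := by
  simp [PySem.Str.slice]

-- ===== VERDICT (by name: the statement is the Claim_ definition above) =====
theorem split_at_indices_spec : Claim_equal_split_at_indices := by
  intro line indices _
  unfold Spec_split_at_indices split_at_indices split_at_indices_alt
  rw [pvA_eq line indices [] 0, pvB_fold line indices]
  simp only [List.nil_append, List.reverse_append, List.reverse_reverse,
    List.reverse_cons, List.reverse_nil]
  rw [pvPieces_eq line indices 0]
  cases indices.head? with
  | none => simp [pvSlice_zero]
  | some e => simp [pvSlice_zero]
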